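-- pv_equiv track=rewrite | github.com/scott-sattler/DSA-python | leetcode_solutions/0392. Is Subsequence.py | first_attempt_isSubsequence
-- ===== SOURCE A (Python) =====
-- def first_attempt_isSubsequence(s: str, t: str) -> bool:  # noqa
--     # record potential substring occurrences
--     # decrement occurrences from superstring
--     # >return true if no substring occurrences remain
--
--     hash_map: dict[str, int] = {}
--
--     for each_s_char in s:
--         key_found = hash_map.get(each_s_char, False)
--         if key_found:
--             hash_map[each_s_char] += 1
--         else:  # new char
--             hash_map[each_s_char] = 1
--
--     for each_t_char in t:
--         key_found = hash_map.get(each_t_char, False)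
--         if key_found:
--             hash_map[each_t_char] -= 1
--
--     for each_bucket in hash_map.values():
--         if each_bucket > 0:
--             return False
--
--     return True
-- ===== SOURCE B (Python) =====
-- def first_attempt_isSubsequence(s: str, t: str) -> bool:
--     # Sort both strings, then greedily match sorted(s) as a subsequence of
--     # sorted(t) with two pointers: equivalent to "every char of s occurs at
--     # least as often in t", which is what A's count-and-decrement computes.
--     a = sorted(s)
--     b = sorted(t)
--     i = 0
--     for ch in b:
--         if i < len(a) and ch == a[i]:
--             i += 1
--     return i == len(a)
-- ===== Notes on version B (the rewrite author's own statement) =====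
-- stated objective: alternative
-- what changed: Replaces A's three dict passes (count chars of s, decrement while scanning t, scan buckets) by sorting both strings and running a two-pointer greedy subsequence match over the sorted lists.
import Mathlib
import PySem

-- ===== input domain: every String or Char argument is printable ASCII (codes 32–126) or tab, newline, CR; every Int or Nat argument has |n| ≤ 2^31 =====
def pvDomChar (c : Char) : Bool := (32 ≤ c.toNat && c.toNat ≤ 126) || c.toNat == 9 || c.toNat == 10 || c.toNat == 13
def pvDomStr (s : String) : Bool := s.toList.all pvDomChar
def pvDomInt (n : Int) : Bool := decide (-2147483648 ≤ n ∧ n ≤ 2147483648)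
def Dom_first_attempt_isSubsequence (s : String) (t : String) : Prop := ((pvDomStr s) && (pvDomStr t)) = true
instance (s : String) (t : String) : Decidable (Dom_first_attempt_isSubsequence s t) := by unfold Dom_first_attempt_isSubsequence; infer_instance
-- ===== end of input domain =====

-- B sorts both strings and two-pointer-matches instead of A's dict count/decrement/scan.

-- ===== PORT A =====
-- first loop body: hash_map.get(c, False) is truthy iff present and nonzero
def pvStepS (d : PySem.Dict Char Int) (c : Char) : PySem.Dict Char Int :=
  if d.getD c 0 ≠ 0 then d.modify c 0 (· + 1) else d.insert c 1

def pvCountS (s : List Char) : PySem.Dict Char Int :=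
  s.foldl pvStepS PySem.Dict.empty

-- second loop body: decrement a bucket while it is truthy (nonzero)
def pvStepT (d : PySem.Dict Char Int) (c : Char) : PySem.Dict Char Int :=
  if d.getD c 0 ≠ 0 then d.modify c 0 (· - 1) else d

def pvDecT (d : PySem.Dict Char Int) (t : List Char) : PySem.Dict Char Int :=
  t.foldl pvStepT d

-- third loop: return False on the first bucket > 0, else True
def first_attempt_isSubsequence (s : String) (t : String) : Bool :=
  (pvDecT (pvCountS s.toList) t.toList).values.all (fun v => !decide (0 < v))

-- ===== PORT B =====
-- Source B's for-loop over b: advance i over a on a match; afterwards check i == len(a),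
-- rendered structurally as recursion over the remaining suffixes of a and b
def pvTwoPointer : List Char → List Char → Bool
  | as, [] => as.isEmpty
  | [], _ :: bs => pvTwoPointer [] bs
  | a :: as, b :: bs => if b == a then pvTwoPointer as bs else pvTwoPointer (a :: as) bs

def first_attempt_isSubsequence_alt (s : String) (t : String) : Bool :=
  pvTwoPointer (PySem.List.sorted s.toList (fun c => c) false)
               (PySem.List.sorted t.toList (fun c => c) false)

-- ===== PRECONDITION & SPEC =====
def Spec_first_attempt_isSubsequence (s : String) (t : String) (out : Bool) : Prop := out = first_attempt_isSubsequence_alt s t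
instance (s : String) (t : String) (out : Bool) : Decidable (Spec_first_attempt_isSubsequence s t out) := by unfold Spec_first_attempt_isSubsequence; infer_instance

-- ===== CLAIM (what is proved, stated in full; the proofs are below) =====
def Claim_equal_first_attempt_isSubsequence : Prop := ∀ (s : String) (t : String), Dom_first_attempt_isSubsequence s t → Spec_first_attempt_isSubsequence s t (first_attempt_isSubsequence s t)

-- ===== LEMMAS AND PROOFS =====

theorem pvCountS_append (xs : List Char) (a : Char) :
    pvCountS (xs ++ [a]) = pvStepS (pvCountS xs) a := by
  simp [pvCountS, List.foldl_append]

-- A side: the dict after the first loop holds the exact counts of s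
theorem pvCountS_getD (s : List Char) (c : Char) :
    (pvCountS s).getD c 0 = s.count c := by
  induction s using List.reverseRecOn with
  | nil => simp [pvCountS, PySem.Dict.getD_empty]
  | append_singleton xs a ih =>
    rw [pvCountS_append, pvStepS]
    by_cases hca : c = a
    · subst hca
      split_ifs with h
      · rw [PySem.Dict.getD_modify, if_pos rfl, ih]
        simp [List.count_append]
      · rw [not_not, ih] at h
        have h0 : List.count c xs = 0 := by exact_mod_cast h
        rw [PySem.Dict.getD_insert, if_pos rfl]
        simp [List.count_append, h0]
    · have hac : a ≠ c := Ne.symm hca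
      have hc1 : List.count c [a] = 0 := by simp [hac]
      split_ifs with h
      · rw [PySem.Dict.getD_modify, if_neg hca, ih]
        simp [List.count_append, hc1]
      · rw [PySem.Dict.getD_insert, if_neg hca, ih]
        simp [List.count_append, hc1]

theorem pvCountS_nonneg (s : List Char) (c : Char) : 0 ≤ (pvCountS s).getD c 0 := by
  rw [pvCountS_getD]; positivity

-- A side: after the second loop each bucket is max 0 (old − count in t)
theorem pvDecT_getD (t : List Char) (d : PySem.Dict Char Int) (c : Char)
    (h : 0 ≤ d.getD c 0) :
    (pvDecT d t).getD c 0 = max 0 (d.getD c 0 - t.count c) := by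
  induction t generalizing d with
  | nil =>
    simp only [pvDecT, List.foldl_nil, List.count_nil]
    omega
  | cons b bs ih =>
    show (pvDecT (pvStepT d b) bs).getD c 0 = _
    rw [pvStepT]
    by_cases hcb : c = b
    · subst hcb
      split_ifs with hnz
      · rw [ih _ (by rw [PySem.Dict.getD_modify, if_pos rfl]; omega),
            PySem.Dict.getD_modify, if_pos rfl]
        simp only [List.count_cons_self]
        omega
      · rw [not_not] at hnz
        rw [ih _ h, hnz]
        simp only [List.count_cons_self]
        omega
    · have hbc : b ≠ c := fun hh => hcb hh.symm
      split_ifs with hnz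
      · rw [ih _ (by rw [PySem.Dict.getD_modify, if_neg hcb]; exact h),
            PySem.Dict.getD_modify, if_neg hcb]
        simp [hbc]
      · rw [ih _ h]
        simp [hbc]

-- keys stay nodup through both loops
theorem pvCountS_nodup (s : List Char) : (pvCountS s).keys.Nodup := by
  induction s using List.reverseRecOn with
  | nil => exact PySem.Dict.nodup_keys_empty
  | append_singleton xs a ih =>
    rw [pvCountS_append, pvStepS]
    split_ifs with h
    · rw [show ((pvCountS xs).modify a 0 (· + 1)).keys
            = ((pvCountS xs).insert a ((pvCountS xs).getD a 0 + 1)).keys from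
          PySem.Dict.keys_modify _ _ _ _]
      exact PySem.Dict.nodup_keys_insert _ _ _ ih
    · exact PySem.Dict.nodup_keys_insert _ _ _ ih

theorem pvDecT_nodup (t : List Char) (d : PySem.Dict Char Int) (h : d.keys.Nodup) :
    (pvDecT d t).keys.Nodup := by
  induction t generalizing d with
  | nil => exact h
  | cons b bs ih =>
    show (pvDecT (pvStepT d b) bs).keys.Nodup
    refine ih _ ?_
    rw [pvStepT]
    split_ifs with hnz
    · rw [PySem.Dict.keys_modify]
      exact PySem.Dict.nodup_keys_insert _ _ _ h
    · exact h

-- the second loop never removes keys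
theorem pvDecT_keys_superset (t : List Char) (d : PySem.Dict Char Int) (c : Char)
    (h : c ∈ d.keys) : c ∈ (pvDecT d t).keys := by
  induction t generalizing d with
  | nil => exact h
  | cons b bs ih =>
    show c ∈ (pvDecT (pvStepT d b) bs).keys
    refine ih _ ?_
    rw [pvStepT]
    split_ifs with hnz
    · rw [PySem.Dict.keys_modify]
      exact (PySem.Dict.mem_keys_insert _ _ _ _).mpr (Or.inr h)
    · exact h

-- A returns true iff every char's count in s is ≤ its count in t
theorem portA_iff (s t : List Char) :
    ((pvDecT (pvCountS s) t).values.all (fun v => !decide (0 < v)) = true)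
      ↔ ∀ c : Char, s.count c ≤ t.count c := by
  have hnd : (pvDecT (pvCountS s) t).keys.Nodup := pvDecT_nodup _ _ (pvCountS_nodup s)
  rw [PySem.Dict.values_eq_map_keys _ hnd 0]
  simp only [List.all_map, List.all_eq_true, Function.comp,
    Bool.not_eq_eq_eq_not, Bool.not_true, decide_eq_false_iff_not, not_lt]
  constructor
  · intro h c
    by_cases hk : c ∈ (pvDecT (pvCountS s) t).keys
    · have hle := h c hk
      rw [pvDecT_getD _ _ _ (pvCountS_nonneg s c), pvCountS_getD] at hle
      have := le_max_left (0 : Int) ((s.count c : Int) - t.count c)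
      omega
    · have h0 : s.count c = 0 := by
        by_contra hne
        refine hk (pvDecT_keys_superset t _ c ?_)
        refine (PySem.Dict.contains_iff_mem_keys _ _).mp ?_
        rw [PySem.Dict.contains_eq_isSome_get?]
        cases hg : (pvCountS s).get? c with
        | none =>
          exfalso
          apply hne
          have := pvCountS_getD s c
          rw [PySem.Dict.getD_eq_get?_getD, hg, Option.getD_none] at this
          exact_mod_cast this.symm
        | some v => rfl
      omega
  · intro h c _
    rw [pvDecT_getD _ _ _ (pvCountS_nonneg s c), pvCountS_getD]
    have := h c
    omega

-- B side: the two-pointer matcher decides sublist (on lawful BEq)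
theorem pvTwoPointer_eq_isSublist (bs as : List Char) :
    pvTwoPointer as bs = as.isSublist bs := by
  induction bs generalizing as with
  | nil => cases as <;> simp [pvTwoPointer, List.isSublist]
  | cons b bs ih =>
    cases as with
    | nil => simp [pvTwoPointer, List.isSublist, ih]
    | cons a as' =>
      simp only [pvTwoPointer, List.isSublist]
      rw [BEq.comm (a := b) (b := a)]
      split_ifs <;> exact ih _

theorem portB_iff (s t : List Char) :
    (pvTwoPointer (PySem.List.sorted s (fun c => c) false)
        (PySem.List.sorted t (fun c => c) false) = true)
      ↔ ∀ c : Char, s.count c ≤ t.count c := by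
  rw [pvTwoPointer_eq_isSublist, List.isSublist_iff_sublist]
  have hps := PySem.List.sorted_perm s (fun c => c) false
  have hpt := PySem.List.sorted_perm t (fun c => c) false
  constructor
  · intro h c
    by_cases hc : c ∈ s
    · have hmem : c ∈ PySem.List.sorted s (fun c => c) false := hps.mem_iff.mpr hc
      have := List.subperm_ext_iff.mp h.subperm c hmem
      rwa [hps.count_eq, hpt.count_eq] at this
    · simp [List.count_eq_zero_of_not_mem hc]
  · intro h
    refine List.sublist_of_subperm_of_pairwise ?_
      (PySem.List.sorted_pairwise s (fun c => c))
      (PySem.List.sorted_pairwise t (fun c => c))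
    refine List.subperm_ext_iff.mpr (fun c _ => ?_)
    rw [hps.count_eq, hpt.count_eq]
    exact h c

-- ===== VERDICT (by name: the statement is the Claim_ definition above) =====
theorem first_attempt_isSubsequence_spec : Claim_equal_first_attempt_isSubsequence := by
  intro s t _
  unfold Spec_first_attempt_isSubsequence first_attempt_isSubsequence first_attempt_isSubsequence_alt
  rcases hA : (pvDecT (pvCountS s.toList) t.toList).values.all (fun v => !decide (0 < v)) with _ | _
  · rcases hB : pvTwoPointer (PySem.List.sorted s.toList (fun c => c) false)
        (PySem.List.sorted t.toList (fun c => c) false) with _ | _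
    · rfl
    · exact absurd ((portA_iff s.toList t.toList).mpr ((portB_iff s.toList t.toList).mp hB))
        (by simp [hA])
  · exact ((portB_iff s.toList t.toList).mpr ((portA_iff s.toList t.toList).mp hA)).symm
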